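-- pv_equiv track=rewrite | github.com/linzeyang/leetcode-solutions | medium/3818.py | minimumPrefixLength
-- ===== SOURCE A (Python) =====
-- from typing import List
--
-- def minimumPrefixLength(nums: List[int]) -> int:
--     length: int = len(nums)
--
--     if length == 1:
--         return 0
--
--     for idx in range(1, length):
--         if nums[-idx - 1] >= nums[-idx]:
--             break
--     else:
--         return 0
--
--     return length - idx
-- ===== SOURCE B (Python) =====
-- from typing import List
--
-- def minimumPrefixLength(nums: List[int]) -> int:
--     start = 0
--     for i in range(1, len(nums)):
--         if nums[i] <= nums[i - 1]:
--             start = i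
--     return start
-- ===== Notes on version B (the rewrite author's own statement) =====
-- stated objective: simpler
-- what changed: Replaces the right-to-left negative-index scan with early break (plus a special case for length 1 and a for/else) by a single left-to-right pass that keeps the index of the last strict-increase break in an accumulator.
import Mathlib
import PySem

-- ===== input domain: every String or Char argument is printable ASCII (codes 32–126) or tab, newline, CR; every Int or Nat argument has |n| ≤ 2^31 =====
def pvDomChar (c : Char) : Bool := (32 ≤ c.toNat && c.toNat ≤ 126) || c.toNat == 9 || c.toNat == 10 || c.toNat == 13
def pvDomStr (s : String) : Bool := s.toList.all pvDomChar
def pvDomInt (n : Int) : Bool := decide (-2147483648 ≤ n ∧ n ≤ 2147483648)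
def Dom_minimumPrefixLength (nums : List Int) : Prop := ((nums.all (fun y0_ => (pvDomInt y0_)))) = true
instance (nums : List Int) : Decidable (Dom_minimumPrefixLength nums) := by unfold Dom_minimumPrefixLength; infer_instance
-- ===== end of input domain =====

-- B replaces A's right-to-left negative-index scan with early break by one forward pass
-- keeping the index of the last strict-increase break (objective: simpler).

-- ===== PORT A =====
-- the `for idx in range(1, length)` loop with its `break`/`else: return 0`
def pvALoop (nums : List Int) (len : Int) : List Int → Int
  | [] => 0
  | idx :: rest =>
    match PySem.List.pyGet? nums (-idx - 1), PySem.List.pyGet? nums (-idx) with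
    | some a, some b => if a ≥ b then len - idx else pvALoop nums len rest
    | _, _ => 0  -- IndexError; unreachable for idx ∈ range(1, len)

def minimumPrefixLength (nums : List Int) : Int :=
  let length : Int := nums.length
  if length = 1 then 0
  else pvALoop nums length (PySem.List.pyRange 1 length 1)

-- ===== PORT B =====
def minimumPrefixLength_alt (nums : List Int) : Int :=
  (PySem.List.pyRange 1 (nums.length : Int) 1).foldl
    (fun start i =>
      match PySem.List.pyGet? nums i, PySem.List.pyGet? nums (i - 1) with
      | some a, some b => if a ≤ b then i else start
      | _, _ => start)  -- IndexError; unreachable for i ∈ range(1, len)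
    0

-- ===== PRECONDITION & SPEC =====
def Spec_minimumPrefixLength (nums : List Int) (out : Int) : Prop := out = minimumPrefixLength_alt nums
instance (nums : List Int) (out : Int) : Decidable (Spec_minimumPrefixLength nums out) := by unfold Spec_minimumPrefixLength; infer_instance

-- ===== CLAIM (what is proved, stated in full; the proofs are below) =====
def Claim_equal_minimumPrefixLength : Prop := ∀ (nums : List Int), Dom_minimumPrefixLength nums → Spec_minimumPrefixLength nums (minimumPrefixLength nums)

-- ===== LEMMAS AND PROOFS =====

-- reference value: largest k ∈ [1, m] with nums[k-1] ≥ nums[k], else 0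
def pvL (nums : List Int) : Nat → Nat
  | 0 => 0
  | m + 1 => if nums.getD m 0 ≥ nums.getD (m + 1) 0 then m + 1 else pvL nums m

theorem pvB_eq_pvL (nums : List Int) :
    ∀ (m : Nat), m ≤ nums.length →
      (PySem.List.pyRange 1 (m : Int) 1).foldl
        (fun start i =>
          match PySem.List.pyGet? nums i, PySem.List.pyGet? nums (i - 1) with
          | some a, some b => if a ≤ b then i else start
          | _, _ => start) 0 = ((pvL nums (m - 1) : Nat) : Int) := by
  intro m
  induction m with
  | zero => intro _; simp [PySem.List.pyRange_one_eq_nil, pvL]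
  | succ k ih =>
    intro hk
    cases k with
    | zero =>
      simp [show ((0+1:Nat):Int) = 1 from by norm_num,
        PySem.List.pyRange_one_eq_nil (le_refl (1:Int)), pvL]
    | succ j =>
      have h1 : (1 : Int) ≤ ((j+1 : Nat) : Int) := by push_cast; omega
      have h2 : ((j+1 : Nat) : Int) ≤ ((j+2 : Nat) : Int) := by push_cast; omega
      have hsplit := PySem.List.pyRange_one_append 1 ((j+1 : Nat) : Int) ((j+2 : Nat) : Int) h1 h2
      have hsing : PySem.List.pyRange ((j+1 : Nat) : Int) ((j+2 : Nat) : Int) 1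
          = [((j+1 : Nat) : Int)] := by
        have : ((j+2 : Nat) : Int) = ((j+1 : Nat) : Int) + 1 := by push_cast; ring
        rw [this, PySem.List.pyRange_one_singleton]
      have hlt : j + 1 < nums.length := by omega
      have hlt' : j < nums.length := by omega
      have hg1 : PySem.List.pyGet? nums ((j+1 : Nat) : Int) = some nums[j+1] := by
        rw [PySem.List.pyGet?_natCast]; simp [hlt]
      have hg0 : PySem.List.pyGet? nums (((j+1 : Nat) : Int) - 1) = some nums[j] := by
        have : ((j+1 : Nat) : Int) - 1 = ((j : Nat) : Int) := by push_cast; ring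
        rw [this, PySem.List.pyGet?_natCast]; simp [hlt']
      rw [hsplit, hsing, List.foldl_append, ih (by omega)]
      simp only [List.foldl_cons, List.foldl_nil, hg1, hg0, Nat.add_sub_cancel]
      have hd1 : nums.getD (j+1) 0 = nums[j+1] := List.getD_eq_getElem _ _ hlt
      have hd0 : nums.getD j 0 = nums[j] := List.getD_eq_getElem _ _ hlt'
      have hL : pvL nums (j+1) = if nums[j+1] ≤ nums[j] then j+1 else pvL nums j := by
        simp only [pvL, hd1, hd0, ge_iff_le]
      rw [hL]
      by_cases hc : nums[j+1] ≤ nums[j] <;> simp [hc]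

theorem pvA_eq_pvL (nums : List Int) :
    ∀ (d j : Nat), j + d = nums.length → 1 ≤ j →
      pvALoop nums (nums.length : Int)
        (PySem.List.pyRange (j : Int) (nums.length : Int) 1)
        = ((pvL nums (nums.length - j) : Nat) : Int) := by
  intro d
  induction d with
  | zero =>
    intro j hj _
    have : (nums.length : Int) ≤ (j : Int) := by omega
    rw [PySem.List.pyRange_one_eq_nil this]
    have : nums.length - j = 0 := by omega
    simp [pvALoop, this, pvL]
  | succ e ih =>
    intro j hj h1
    have hlt : (j : Int) < (nums.length : Int) := by omega
    rw [PySem.List.pyRange_one_cons hlt]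
    have hjn : j < nums.length := by omega
    have hg0 : PySem.List.pyGet? nums (-(j : Int) - 1) = some nums[nums.length - (j+1)] := by
      have h : -(j : Int) - 1 = -((j+1 : Nat) : Int) := by push_cast; ring
      rw [h, PySem.List.pyGet?_neg_natCast nums (j+1) (by omega) (by omega)]
      simp [show nums.length - (j+1) < nums.length by omega]
    have hg1 : PySem.List.pyGet? nums (-(j : Int)) = some nums[nums.length - j] := by
      rw [PySem.List.pyGet?_neg_natCast nums j (by omega) (by omega)]
      simp [show nums.length - j < nums.length by omega]
    simp only [pvALoop, hg0, hg1]
    have hm : nums.length - j = (nums.length - (j+1)) + 1 := by omega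
    have hd1 : nums.getD (nums.length - (j+1)) 0 = nums[nums.length - (j+1)] :=
      List.getD_eq_getElem _ _ (by omega)
    have hd0 : nums.getD (nums.length - (j+1) + 1) 0 = nums[nums.length - j] := by
      have : nums.length - (j+1) + 1 = nums.length - j := by omega
      rw [this]; exact List.getD_eq_getElem _ _ (by omega)
    by_cases hc : nums[nums.length - (j+1)] ≥ nums[nums.length - j]
    · rw [if_pos hc, hm]
      simp only [pvL, hd1, hd0]
      rw [if_pos hc]
      omega
    · rw [if_neg hc]
      have hrec : (j : Int) + 1 = ((j+1 : Nat) : Int) := by push_cast; ring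
      rw [hrec, ih (j+1) (by omega) (by omega), hm]
      simp only [pvL, hd1, hd0]
      rw [if_neg hc]

-- ===== VERDICT (by name: the statement is the Claim_ definition above) =====
theorem minimumPrefixLength_spec : Claim_equal_minimumPrefixLength := by
  intro nums _
  unfold Spec_minimumPrefixLength minimumPrefixLength minimumPrefixLength_alt
  rw [pvB_eq_pvL nums nums.length le_rfl]
  by_cases h1 : (nums.length : Int) = 1
  · have : nums.length = 1 := by omega
    simp [this, pvL]
  · simp only [h1, if_false]
    by_cases h0 : nums.length = 0
    · rw [h0]
      simp [PySem.List.pyRange_one_eq_nil, pvALoop, pvL]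
    · have := pvA_eq_pvL nums (nums.length - 1) 1 (by omega) le_rfl
      simpa using this
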